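-- pv_equiv track=rewrite | github.com/surajitdharofficial21-rgb/trading_dss | src/analysis/news/event_calendar.py | _parse_month_names
-- ===== SOURCE A (Python) =====
-- def _parse_month_names(text: str) -> list[int]:
--     month_map = {
--         "january": 1, "february": 2, "march": 3, "april": 4,
--         "may": 5, "june": 6, "july": 7, "august": 8,
--         "september": 9, "october": 10, "november": 11, "december": 12,
--     }
--     months: list[int] = []
--     for word in text.lower().replace(",", " ").split():
--         if word in month_map:
--             months.append(month_map[word])
--     return sorted(set(months))
-- ===== SOURCE B (Python) =====
-- def _parse_month_names(text: str) -> list[int]: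
--     month_names = [
--         "january", "february", "march", "april", "may", "june",
--         "july", "august", "september", "october", "november", "december",
--     ]
--     words = set(text.lower().replace(",", " ").split())
--     return [m for m, name in enumerate(month_names, 1) if name in words]
-- ===== Notes on version B (the rewrite author's own statement) =====
-- stated objective: simpler
-- what changed: B probes the 12 month names (in calendar order) against a set built from the text's words, so the result is sorted and unique by construction and the sorted(set(...)) pass over collected tokens disappears.
import Mathlib
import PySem

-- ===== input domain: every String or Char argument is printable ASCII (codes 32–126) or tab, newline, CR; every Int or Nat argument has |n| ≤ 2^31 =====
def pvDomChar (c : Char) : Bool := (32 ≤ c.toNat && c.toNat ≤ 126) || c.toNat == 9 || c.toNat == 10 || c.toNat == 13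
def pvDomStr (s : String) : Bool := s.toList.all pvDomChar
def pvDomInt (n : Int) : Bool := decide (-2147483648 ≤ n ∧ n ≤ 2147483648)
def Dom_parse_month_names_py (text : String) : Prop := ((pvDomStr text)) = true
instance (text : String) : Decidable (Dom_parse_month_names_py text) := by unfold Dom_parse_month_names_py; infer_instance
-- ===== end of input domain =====

-- B iterates the 12 month entries in calendar order against a set of the text's words,
-- so the output is sorted and unique by construction (objective: simpler).

-- ===== PORT A =====
def pvMonthPairs : List (String × Int) :=
  [("january",1),("february",2),("march",3),("april",4),("may",5),("june",6),
   ("july",7),("august",8),("september",9),("october",10),("november",11),("december",12)]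

-- loop body: 'if word in month_map: months.append(month_map[word])'
def pvStepA (month_map : PySem.Dict String Int) (acc : List Int) (word : String) : List Int :=
  match PySem.Dict.get? month_map word with
  | some v => acc ++ [v]
  | none => acc

def parse_month_names_py (text : String) : List Int :=
  let month_map : PySem.Dict String Int := PySem.Dict.ofList pvMonthPairs
  let months : List Int :=
    (PySem.Str.split₀ (PySem.Str.replace (PySem.Str.lower text) "," " ")).foldl
      (pvStepA month_map) []
  PySem.List.sorted (PySem.Set.ofList months) (fun x => x) false

-- ===== PORT B =====
def pvMonthNames : List String :=
  ["january","february","march","april","may","june",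
   "july","august","september","october","november","december"]

def parse_month_names_py_alt (text : String) : List Int :=
  let words : PySem.Set String :=
    PySem.Set.ofList (PySem.Str.split₀ (PySem.Str.replace (PySem.Str.lower text) "," " "))
  (PySem.List.enumerate pvMonthNames 1).foldl
    (fun acc p => if PySem.Set.contains words p.2 then acc ++ [p.1] else acc) []

-- ===== PRECONDITION & SPEC =====
def Spec_parse_month_names_py (text : String) (out : List Int) : Prop := out = parse_month_names_py_alt text
instance (text : String) (out : List Int) : Decidable (Spec_parse_month_names_py text out) := by unfold Spec_parse_month_names_py; infer_instance

-- ===== CLAIM (what is proved, stated in full; the proofs are below) =====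
def Claim_equal_parse_month_names_py : Prop := ∀ (text : String), Dom_parse_month_names_py text → Spec_parse_month_names_py text (parse_month_names_py text)

-- ===== LEMMAS AND PROOFS =====

-- the literal value of enumerate(month_names, 1)
def pvE : List (Int × String) :=
  [((1:Int),"january"),(2,"february"),(3,"march"),(4,"april"),(5,"may"),(6,"june"),
   (7,"july"),(8,"august"),(9,"september"),(10,"october"),(11,"november"),(12,"december")]

set_option maxHeartbeats 1000000 in
lemma pv_ofList_eq_mk : PySem.Dict.ofList pvMonthPairs = PySem.Dict.mk pvMonthPairs := by decide

lemma pv_enumerate_eq : PySem.List.enumerate pvMonthNames 1 = pvE := by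
  simp [pvMonthNames, pvE, PySem.List.enumerate_cons, PySem.List.enumerate_nil]

-- A's loop collects exactly the successful lookups, in token order
lemma pv_loopA (mm : PySem.Dict String Int) (ws : List String) (acc : List Int) :
    ws.foldl (pvStepA mm) acc = acc ++ ws.filterMap (fun w => PySem.Dict.get? mm w) := by
  induction ws generalizing acc with
  | nil => simp
  | cons w t ih =>
    simp only [List.foldl_cons, List.filterMap_cons, pvStepA]
    cases h : PySem.Dict.get? mm w <;> simp [ih]

-- B's loop is filter-then-project over the enumerated pairs
lemma pv_loopB (words : PySem.Set String) (l : List (Int × String)) (acc : List Int) :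
    l.foldl (fun acc p => if PySem.Set.contains words p.2 then acc ++ [p.1] else acc) acc
      = acc ++ (l.filter (fun p => PySem.Set.contains words p.2)).map (·.1) := by
  induction l generalizing acc with
  | nil => simp
  | cons p t ih =>
    simp only [List.foldl_cons, List.filter_cons]
    cases h : PySem.Set.contains words p.2 <;>
      simp only [h, Bool.false_eq_true, if_false, if_true, ih, List.map_cons,
        List.append_assoc, List.singleton_append]

-- a successful month_map lookup is an entry of the association list …
lemma pv_get_mem_gen (l : List (String × Int)) (w : String) (a : Int)
    (h : PySem.Dict.get? (PySem.Dict.mk l) w = some a) : (w, a) ∈ l := by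
  induction l with
  | nil => simp [PySem.Dict.get?] at h
  | cons p t ih =>
    obtain ⟨k, v⟩ := p
    rw [PySem.Dict.get?_mk_cons] at h
    split_ifs at h with hk
    · obtain rfl := eq_of_beq hk
      injection h with hv
      subst hv
      exact List.mem_cons_self
    · exact List.mem_cons_of_mem _ (ih h)

-- … hence one of the twelve (number, name) pairs …
set_option maxHeartbeats 1000000 in
lemma pv_get_mem (w : String) (a : Int)
    (h : PySem.Dict.get? (PySem.Dict.mk pvMonthPairs) w = some a) : (a, w) ∈ pvE := by
  have hm := pv_get_mem_gen _ _ _ h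
  simp only [pvMonthPairs, List.mem_cons, List.not_mem_nil, or_false, Prod.mk.injEq] at hm
  rcases hm with ⟨rfl,rfl⟩|⟨rfl,rfl⟩|⟨rfl,rfl⟩|⟨rfl,rfl⟩|⟨rfl,rfl⟩|⟨rfl,rfl⟩|⟨rfl,rfl⟩|⟨rfl,rfl⟩|⟨rfl,rfl⟩|⟨rfl,rfl⟩|⟨rfl,rfl⟩|⟨rfl,rfl⟩ <;> decide

-- … and conversely each of the twelve pairs looks up successfully
set_option maxHeartbeats 1000000 in
lemma pv_mem_get : ∀ p ∈ pvE, PySem.Dict.get? (PySem.Dict.mk pvMonthPairs) p.2 = some p.1 := by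
  decide

lemma pv_pairwiseE : pvE.Pairwise (fun p q => p.1 < q.1) := by decide

theorem parse_month_names_py_spec_aux (text : String) :
    parse_month_names_py text = parse_month_names_py_alt text := by
  simp only [parse_month_names_py, parse_month_names_py_alt]
  rw [pv_ofList_eq_mk, pv_enumerate_eq, pv_loopA, pv_loopB, List.nil_append, List.nil_append]
  set ws := PySem.Str.split₀ (PySem.Str.replace (PySem.Str.lower text) "," " ") with hws
  have hpwB : ((pvE.filter (fun p => PySem.Set.contains (PySem.Set.ofList ws) p.2)).map (·.1)).Pairwise
      (fun a b => a < b) :=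
    List.pairwise_map.mpr (List.Pairwise.sublist List.filter_sublist pv_pairwiseE)
  refine PySem.List.sorted_eq_of_perm_of_pairwise_lt _ _ _ ?_ hpwB
  refine (List.perm_ext_iff_of_nodup (hpwB.imp fun h => ne_of_lt h) (PySem.Set.nodup_ofList _)).mpr ?_
  intro a
  simp only [List.mem_map, List.mem_filter, PySem.Set.mem_ofList, List.mem_filterMap,
    PySem.Set.contains, List.contains_iff_mem]
  constructor
  · rintro ⟨p, ⟨hpE, hpw⟩, rfl⟩
    exact ⟨p.2, hpw, pv_mem_get p hpE⟩
  · rintro ⟨w, hwws, hget⟩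
    exact ⟨(a, w), ⟨pv_get_mem w a hget, hwws⟩, rfl⟩

-- ===== VERDICT (by name: the statement is the Claim_ definition above) =====
theorem parse_month_names_py_spec : Claim_equal_parse_month_names_py := by
  intro text _
  exact parse_month_names_py_spec_aux text
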